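-- pv_equiv track=rewrite | github.com/shashiRS/FFL_CL_validation | pl_parking/pl_parking/PLP/MF/VEDODO/common.py | max_consecutive_number
-- ===== SOURCE A (Python) =====
-- def max_consecutive_number(lst, number):
--     """
--     To find the maximum length of consecutive matching number in a given data-list
--     :param lst: data list
--     :param number: matching number
--     :return: Variable to store the maximum length of consecutive number
--     """
--     max_len = 0
--     current_len = 0  # Variable to store the current length of consecutive number
--
--     for num in lst:
--         if num == number:
--             current_len += 1  # Increment the current length if the number is matching
--         else:
--             max_len = max(max_len, current_len)  # Update the max length if necessary
--             current_len = 0  # Reset current length when a 0 is encountered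
--
--     # After the loop, we need to check once more in case the longest streak ends at the last element
--     max_len = max(max_len, current_len)
--
--     return max_len
-- ===== SOURCE B (Python) =====
-- def max_consecutive_number(lst, number):
--     """Max length of a consecutive run of `number` in lst, via a two-pointer
--     run-skipping scan: on a match, advance a second pointer past the whole run
--     and take its length; no streak counter / post-loop fix-up needed."""
--     n = len(lst)
--     best = 0
--     i = 0
--     while i < n:
--         if lst[i] == number:
--             j = i + 1
--             while j < n and lst[j] == number:
--                 j += 1
--             best = max(best, j - i)
--             i = j
--         else:
--             i += 1
--     return best
-- ===== Notes on version B (the rewrite author's own statement) =====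
-- stated objective: alternative
-- what changed: Replaces A's single fold carrying a (max_len, current_len) streak counter with a post-loop fix-up by a two-pointer scan that, on each match, advances a second pointer past the whole run and takes max with its length directly.
import Mathlib
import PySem

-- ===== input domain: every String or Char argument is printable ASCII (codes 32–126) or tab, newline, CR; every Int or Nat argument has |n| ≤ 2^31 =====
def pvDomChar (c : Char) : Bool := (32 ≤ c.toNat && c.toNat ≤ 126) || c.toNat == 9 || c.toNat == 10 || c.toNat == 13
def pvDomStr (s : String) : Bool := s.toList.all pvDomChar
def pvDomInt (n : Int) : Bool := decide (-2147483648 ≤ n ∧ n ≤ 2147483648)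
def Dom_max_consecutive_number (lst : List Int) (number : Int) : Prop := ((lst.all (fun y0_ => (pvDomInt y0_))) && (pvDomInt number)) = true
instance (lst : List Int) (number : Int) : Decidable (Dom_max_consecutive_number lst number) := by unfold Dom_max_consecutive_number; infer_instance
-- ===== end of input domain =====

-- B replaces A's streak counter + post-loop fix-up by a two-pointer scan that skips
-- each whole run of `number` at once (objective: alternative decomposition, same O(n)).

-- ===== PORT A =====
-- A: one fold carrying (max_len, current_len); final max(max_len, current_len).
def max_consecutive_number (lst : List Int) (number : Int) : Int :=
  let r := lst.foldl
    (fun (s : Int × Int) num => if num = number then (s.1, s.2 + 1) else (max s.1 s.2, 0))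
    (0, 0)
  max r.1 r.2

-- ===== PORT B =====
-- B's outer while loop over the suffix starting at i; the inner `while` advancing j
-- over matches is the takeWhile/dropWhile split of that suffix (x itself matched, so
-- j - i = 1 + length of the matching prefix of xs).
def pvAltGo (number : Int) (l : List Int) (best : Int) : Int :=
  match l with
  | [] => best
  | x :: xs =>
    if x = number then
      pvAltGo number (xs.dropWhile (fun y => y == number))
        (max best ((xs.takeWhile (fun y => y == number)).length + 1))
    else
      pvAltGo number xs best
termination_by l.length
decreasing_by
  · simpa using Nat.lt_succ_of_le (List.length_dropWhile_le _ _)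
  · simp

def max_consecutive_number_alt (lst : List Int) (number : Int) : Int :=
  pvAltGo number lst 0

-- ===== PRECONDITION & SPEC =====
def Spec_max_consecutive_number (lst : List Int) (number : Int) (out : Int) : Prop := out = max_consecutive_number_alt lst number
instance (lst : List Int) (number : Int) (out : Int) : Decidable (Spec_max_consecutive_number lst number out) := by unfold Spec_max_consecutive_number; infer_instance

-- ===== CLAIM (what is proved, stated in full; the proofs are below) =====
def Claim_equal_max_consecutive_number : Prop := ∀ (lst : List Int) (number : Int), Dom_max_consecutive_number lst number → Spec_max_consecutive_number lst number (max_consecutive_number lst number)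

-- ===== LEMMAS AND PROOFS =====

-- A's loop step, named for the lemmas (definitionally the lambda in the port).
def pvStep (number : Int) (s : Int × Int) (num : Int) : Int × Int :=
  if num = number then (s.1, s.2 + 1) else (max s.1 s.2, 0)

theorem pvNonneg (number : Int) : ∀ (l : List Int) (m c : Int), 0 ≤ m → 0 ≤ c →
    0 ≤ (List.foldl (pvStep number) (m, c) l).1 ∧ 0 ≤ (List.foldl (pvStep number) (m, c) l).2 := by
  intro l
  induction l with
  | nil => intro m c hm hc; simpa using ⟨hm, hc⟩
  | cons x xs ih =>
    intro m c hm hc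
    by_cases hx : x = number
    · simpa [pvStep, hx] using ih m (c + 1) hm (by omega)
    · simpa [pvStep, hx] using ih (max m c) 0 (by omega) le_rfl

theorem pvShift (number : Int) : ∀ (l : List Int) (m c : Int), 0 ≤ m → 0 ≤ c →
    max (List.foldl (pvStep number) (m, c) l).1 (List.foldl (pvStep number) (m, c) l).2
      = max m (max (List.foldl (pvStep number) (0, c) l).1 (List.foldl (pvStep number) (0, c) l).2) := by
  intro l
  induction l with
  | nil => intro m c hm hc; simp; omega
  | cons x xs ih =>
    intro m c hm hc
    by_cases hx : x = number
    · simpa [pvStep, hx] using ih m (c + 1) hm (by omega)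
    · have h1 := ih (max m c) 0 (by omega) le_rfl
      have h2 := ih c 0 hc le_rfl
      simp only [List.foldl_cons, pvStep, hx, if_false]
      rw [max_eq_right hc] at *
      rw [h1, h2]
      omega

theorem pvRun (number : Int) : ∀ (t : List Int), (∀ y ∈ t, y = number) →
    ∀ (rest : List Int) (m c : Int),
    (t ++ rest).foldl (pvStep number) (m, c) = rest.foldl (pvStep number) (m, c + t.length) := by
  intro t
  induction t with
  | nil => intro _ rest m c; simp
  | cons a t ih =>
    intro h rest m c
    have ha : a = number := h a (by simp)
    have harg : c + ((((number : Int) :: t).length : Nat) : Int) = c + 1 + (t.length : Int) := by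
      simp only [List.length_cons]; push_cast; omega
    simp only [List.cons_append, List.foldl_cons, pvStep, ha, if_true]
    rw [ih (fun y hy => h y (by simp [hy])) rest m (c + 1), harg]

theorem pvDropHead (number : Int) (d : List Int)
    (hd : ∀ y ∈ d.head?, ¬ y = number) (c : Int) (hc : 0 ≤ c) :
    max (List.foldl (pvStep number) (0, c) d).1 (List.foldl (pvStep number) (0, c) d).2
      = max c (max (List.foldl (pvStep number) (0, 0) d).1 (List.foldl (pvStep number) (0, 0) d).2) := by
  match d with
  | [] => simp; omega
  | y :: d' =>
    have hy : ¬ y = number := hd y (by simp)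
    have h1 := pvShift number d' c 0 hc le_rfl
    simp only [List.foldl_cons, pvStep, hy, if_false]
    rw [max_eq_right hc, max_self] at *
    exact h1

theorem pvMain (number : Int) (l : List Int) (best : Int) (hb : 0 ≤ best) :
    max best (max (List.foldl (pvStep number) (0, 0) l).1 (List.foldl (pvStep number) (0, 0) l).2)
      = pvAltGo number l best := by
  match l with
  | [] => simp [pvAltGo]; omega
  | x :: xs =>
    by_cases hx : x = number
    · have htall : ∀ y ∈ xs.takeWhile (fun y => y == number), y = number := by
        intro y hy
        simpa using List.mem_takeWhile_imp hy
      have hdh : ∀ y ∈ (xs.dropWhile (fun y : Int => y == number)).head?, ¬ y = number := by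
        cases hh : (xs.dropWhile (fun y : Int => y == number)).head? with
        | none => intro y hy; simp at hy
        | some z =>
          intro y hy
          have h0 := List.head?_dropWhile_not (p := fun y : Int => y == number) xs
          rw [hh] at h0
          simp at h0 hy
          subst hy
          exact h0
      have hxs : xs.takeWhile (fun y : Int => y == number) ++ xs.dropWhile (fun y : Int => y == number) = xs :=
        List.takeWhile_append_dropWhile
      have hrun := pvRun number _ htall (xs.dropWhile (fun y : Int => y == number)) 0 1
      have hdrop := pvDropHead number (xs.dropWhile (fun y : Int => y == number)) hdh
        (1 + ((xs.takeWhile (fun y : Int => y == number)).length : Int)) (by positivity)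
      have hIH := pvMain number (xs.dropWhile (fun y : Int => y == number))
        (max best (((xs.takeWhile (fun y : Int => y == number)).length : Int) + 1))
        (le_trans hb (le_max_left _ _))
      simp only [List.foldl_cons, pvStep, hx, if_true, zero_add]
      rw [pvAltGo, if_pos rfl]
      conv_lhs => rw [← hxs, hrun]
      rw [hdrop, ← hIH]
      omega
    · have hIH := pvMain number xs best hb
      simp only [List.foldl_cons, pvStep, hx, if_false, max_self]
      rw [pvAltGo, if_neg hx]
      exact hIH
termination_by l.length
decreasing_by
  · simpa using Nat.lt_succ_of_le (List.length_dropWhile_le _ _)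
  · simp

-- ===== VERDICT (by name: the statement is the Claim_ definition above) =====
theorem max_consecutive_number_spec : Claim_equal_max_consecutive_number := by
  intro lst number _
  unfold Spec_max_consecutive_number max_consecutive_number max_consecutive_number_alt
  have h := pvMain number lst 0 le_rfl
  have hn := pvNonneg number lst 0 0 le_rfl le_rfl
  change max (List.foldl (pvStep number) (0, 0) lst).1 (List.foldl (pvStep number) (0, 0) lst).2
      = pvAltGo number lst 0
  omega
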